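-- pv_equiv track=rewrite | github.com/aatirFound42/python-cicd-4localServers-withTools | backend/app/utils.py | even_parity
-- ===== SOURCE A (Python) =====
-- def even_parity(n: int) -> bool:
--     """
--     Determine if a number has even parity or not.
--
--     Args:
--         n: Integer to check
--
--     Returns:
--         bool: True if n has even parity, False if n has odd parity
--
--     Raises:
--         ValueError: If input is not an integer
--
--     Example:
--         >>> even_parity(4)
--         True
--         >>> even_parity(5)
--         False
--     """
--     if not isinstance(n, int) or isinstance(n, bool):
--         raise ValueError("Input must be an integer")
--     count = 0
--     for bit in bin(n)[2:]:
--         if bit == "1":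
--             count += 1
--     return not count & 1
-- ===== SOURCE B (Python) =====
-- def even_parity(n: int) -> bool:
--     if not isinstance(n, int) or isinstance(n, bool):
--         raise ValueError("Input must be an integer")
--     m = abs(n)
--     count = 0
--     while m:
--         count += m & 1
--         m >>= 1
--     return not count & 1
-- ===== Notes on version B (the rewrite author's own statement) =====
-- stated objective: idiomatic
-- what changed: Counts set bits arithmetically by masking and shifting abs(n) instead of formatting the number with bin() and scanning the string's characters.
import Mathlib
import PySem

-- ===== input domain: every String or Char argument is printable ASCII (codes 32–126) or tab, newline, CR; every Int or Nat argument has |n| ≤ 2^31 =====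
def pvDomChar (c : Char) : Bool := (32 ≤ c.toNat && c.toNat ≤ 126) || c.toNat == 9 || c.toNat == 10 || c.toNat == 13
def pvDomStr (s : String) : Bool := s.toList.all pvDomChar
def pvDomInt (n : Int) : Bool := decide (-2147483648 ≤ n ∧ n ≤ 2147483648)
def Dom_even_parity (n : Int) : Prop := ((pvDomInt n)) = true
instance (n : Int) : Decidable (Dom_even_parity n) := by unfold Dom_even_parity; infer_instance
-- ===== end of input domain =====

-- B counts set bits of abs(n) by masking and shifting instead of scanning the characters of bin(n)[2:]; same value everywhere.

-- ===== PORT A =====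
-- digits of m in binary, most significant first (empty for 0), as Python's bin produces them
def pvBinDigits (m : Nat) : List Char :=
  if h : m = 0 then [] else pvBinDigits (m / 2) ++ [if m % 2 = 1 then '1' else '0']
decreasing_by exact Nat.div_lt_self (Nat.pos_of_ne_zero h) (by norm_num)

-- bin(n) as a character list: sign, "0b", then digits ("0" for zero)
def pvBin (n : Int) : List Char :=
  (if n < 0 then ['-'] else []) ++ ['0', 'b'] ++
    (if n.natAbs = 0 then ['0'] else pvBinDigits n.natAbs)

def even_parity (n : Int) : Bool :=
  let count := ((pvBin n).drop 2).foldl (fun c bit => if bit = '1' then c + 1 else c) (0 : Nat)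
  decide ((count &&& 1) = 0)

-- ===== PORT B =====
def pvCountBits (m count : Nat) : Nat :=
  if h : m = 0 then count else pvCountBits (m >>> 1) (count + (m &&& 1))
decreasing_by simpa [Nat.shiftRight_succ] using Nat.div_lt_self (Nat.pos_of_ne_zero h) (by norm_num)

def even_parity_alt (n : Int) : Bool :=
  let count := pvCountBits n.natAbs 0
  decide ((count &&& 1) = 0)

-- ===== PRECONDITION & SPEC =====
def Spec_even_parity (n : Int) (out : Bool) : Prop := out = even_parity_alt n
instance (n : Int) (out : Bool) : Decidable (Spec_even_parity n out) := by unfold Spec_even_parity; infer_instance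

-- ===== CLAIM (what is proved, stated in full; the proofs are below) =====
def Claim_equal_even_parity : Prop := ∀ (n : Int), Dom_even_parity n → Spec_even_parity n (even_parity n)

-- ===== LEMMAS AND PROOFS =====

theorem pvFoldl_shift (l : List Char) (c : Nat) :
    l.foldl (fun c bit => if bit = '1' then c + 1 else c) c
      = c + l.foldl (fun c bit => if bit = '1' then c + 1 else c) 0 := by
  induction l generalizing c with
  | nil => simp
  | cons x xs ih =>
    simp only [List.foldl_cons]
    rw [ih, ih (if x = '1' then 0 + 1 else 0)]
    split_ifs <;> omega

theorem pvBinDigits_count (m : Nat) :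
    (pvBinDigits m).foldl (fun c bit => if bit = '1' then c + 1 else c) 0
      = pvCountBits m 0 := by
  induction m using Nat.strong_induction_on with
  | _ m ih =>
    rw [pvBinDigits, pvCountBits]
    by_cases h : m = 0
    · simp [h]
    · have hlt : m / 2 < m := Nat.div_lt_self (Nat.pos_of_ne_zero h) (by norm_num)
      simp only [h, dite_false, List.foldl_append, List.foldl_cons, List.foldl_nil]
      rw [pvFoldl_shift]
      rw [ih (m / 2) hlt]
      have hcb : ∀ k c, pvCountBits k c = c + pvCountBits k 0 := by
        intro k
        induction k using Nat.strong_induction_on with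
        | _ k ihk =>
          intro c
          by_cases hk : k = 0
          · simp [hk, pvCountBits]
          · have hlt2 : k >>> 1 < k := by
              simpa [Nat.shiftRight_succ] using Nat.div_lt_self (Nat.pos_of_ne_zero hk) (by norm_num)
            rw [pvCountBits, dif_neg hk]
            conv_rhs => rw [pvCountBits, dif_neg hk]
            rw [ihk _ hlt2 (c + (k &&& 1)), ihk _ hlt2 (0 + (k &&& 1))]
            omega
      rw [hcb (m >>> 1) (0 + (m &&& 1))]
      have hsh : m >>> 1 = m / 2 := by simp [Nat.shiftRight_succ]
      have hand : m &&& 1 = m % 2 := Nat.and_one_is_mod m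
      rw [hsh, hand]
      by_cases hm : m % 2 = 1 <;> simp [hm] <;> omega

-- ===== VERDICT (by name: the statement is the Claim_ definition above) =====
theorem even_parity_spec : Claim_equal_even_parity := by
  intro n _
  unfold Spec_even_parity even_parity even_parity_alt pvBin
  by_cases hneg : n < 0 <;> by_cases hz : n.natAbs = 0
  · simp [hneg, hz, pvCountBits]
  · simp [hneg, hz, pvBinDigits_count]
  · simp [hneg, hz, pvCountBits]
  · simp [hneg, hz, pvBinDigits_count]
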